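-- pv_equiv track=rewrite | github.com/bled214/algorithm_study_programmers | 신고 결과 받기.py | solution
-- ===== SOURCE A (Python) =====
-- from collections import Counter, defaultdict
--
-- def solution(id_list, report, k):
--     answer = []
--     report_set = set()
--     from_report_to_reported = defaultdict(set)
--
--     for r in report:
--         report_id, reported_id = r.split()
--         report_set.add((report_id, reported_id))
--         from_report_to_reported[report_id].add(reported_id)
--     reported_cnt = Counter([reported_id for report_id, reported_id in report_set])
--     suspended_id = set([key for key, value in reported_cnt.items() if value >= k])
--
--     for id in id_list:
--         t = 0
--         for reported_id in from_report_to_reported[id]: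
--             if reported_id in suspended_id:
--                 t += 1
--         answer.append(t)
--
--     return answer
-- ===== SOURCE B (Python) =====
-- def solution(id_list, report, k):
--     pairs = []
--     seen = set()
--     for r in report:
--         reporter, reported = r.split()
--         if (reporter, reported) not in seen:
--             seen.add((reporter, reported))
--             pairs.append((reporter, reported))
--
--     def cnt(target):
--         return sum(1 for _, t in pairs if t == target)
--
--     return [sum(1 for rep, t in pairs if rep == i and cnt(t) >= k) for i in id_list]
-- ===== Notes on version B (the rewrite author's own statement) =====
-- stated objective: simpler
-- what changed: Drops A's Counter/suspended-set/reporter-to-targets-dict staging entirely: after deduplicating the report pairs, answer[i] is computed by a direct double scan - count pairs (i, t) whose target t is reported by at least k distinct reporters, the latter recomputed by an inner scan of the pair list - so no hash indexes remain at all.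
import Mathlib
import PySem

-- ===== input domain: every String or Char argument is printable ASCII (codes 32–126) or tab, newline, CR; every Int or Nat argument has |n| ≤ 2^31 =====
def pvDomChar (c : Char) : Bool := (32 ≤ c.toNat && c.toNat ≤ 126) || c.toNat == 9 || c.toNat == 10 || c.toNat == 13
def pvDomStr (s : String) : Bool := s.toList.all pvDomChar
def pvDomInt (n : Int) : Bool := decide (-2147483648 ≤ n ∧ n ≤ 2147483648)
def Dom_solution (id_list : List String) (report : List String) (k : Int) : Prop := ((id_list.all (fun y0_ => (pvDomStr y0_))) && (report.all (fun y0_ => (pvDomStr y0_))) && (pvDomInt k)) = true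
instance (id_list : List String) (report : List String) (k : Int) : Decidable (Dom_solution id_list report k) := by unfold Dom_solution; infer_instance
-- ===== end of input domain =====

-- B replaces A's Counter/suspended-set/per-reporter-dict staging by direct double scans over the
-- deduplicated pair list (objective: simpler decomposition, not faster).


-- ===== PORT A =====
def solution (id_list : List String) (report : List String) (k : Int) : List Int :=
  let st := report.foldl
    (fun (acc : PySem.Set (String × String) × PySem.Dict String (PySem.Set String)) r =>
      (PySem.Set.add acc.1 ((PySem.Str.split₀ r).getD 0 "", (PySem.Str.split₀ r).getD 1 ""),
       PySem.Dict.modify acc.2 ((PySem.Str.split₀ r).getD 0 "") PySem.Set.empty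
         (fun s => PySem.Set.add s ((PySem.Str.split₀ r).getD 1 ""))))
    (PySem.Set.empty, PySem.Dict.empty)
  let report_set := st.1
  let from_report_to_reported := st.2
  let reported_cnt := PySem.Dict.counter (report_set.map (fun p => p.2))
  let suspended_id : PySem.Set String :=
    PySem.Set.ofList (((PySem.Dict.items reported_cnt).filter (fun kv => k ≤ kv.2)).map (fun kv => kv.1))
  id_list.foldl
    (fun answer id =>
      answer ++ [(PySem.Dict.getD from_report_to_reported id PySem.Set.empty).foldl
        (fun t reported_id => if PySem.Set.contains suspended_id reported_id then t + 1 else t) 0])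
    []

-- ===== PORT B =====
-- helper: B's inner 'cnt' closure — scans the deduped pair list counting pairs with this target
def pvCnt (pairs : List (String × String)) (target : String) : Int :=
  pairs.foldl (fun n p => if p.2 == target then n + 1 else n) 0

def solution_alt (id_list : List String) (report : List String) (k : Int) : List Int :=
  let st := report.foldl
    (fun (acc : List (String × String) × PySem.Set (String × String)) r =>
      let p := ((PySem.Str.split₀ r).getD 0 "", (PySem.Str.split₀ r).getD 1 "")
      if PySem.Set.contains acc.2 p then acc
      else (acc.1 ++ [p], PySem.Set.add acc.2 p))
    ([], PySem.Set.empty)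
  let pairs := st.1
  id_list.map (fun i =>
    pairs.foldl (fun n p => if p.1 == i && decide (k ≤ pvCnt pairs p.2) then n + 1 else n) 0)

-- ===== PRECONDITION & SPEC =====
-- Pre_ excludes inputs where some report string does not split into exactly two words: there
-- the tuple unpacking 'report_id, reported_id = r.split()' raises ValueError in both A and B.
def Pre_solution (id_list : List String) (report : List String) (k : Int) : Prop :=
  ∀ r ∈ report, (PySem.Str.split₀ r).length = 2
instance (id_list : List String) (report : List String) (k : Int) : Decidable (Pre_solution id_list report k) := by unfold Pre_solution; infer_instance
def pvWitness_solution : List String × List String × Int :=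
  (["muzi", "frodo", "apeach"], ["muzi frodo", "apeach frodo", "muzi frodo"], 2)

def Spec_solution (id_list : List String) (report : List String) (k : Int) (out : List Int) : Prop := out = solution_alt id_list report k
instance (id_list : List String) (report : List String) (k : Int) (out : List Int) : Decidable (Spec_solution id_list report k out) := by unfold Spec_solution; infer_instance

-- ===== CLAIM (what is proved, stated in full; the proofs are below) =====
def Claim_equal_solution : Prop := ∀ (id_list : List String) (report : List String) (k : Int), Dom_solution id_list report k → Pre_solution id_list report k → Spec_solution id_list report k (solution id_list report k)

-- ===== LEMMAS AND PROOFS =====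

def pvTok (r : String) : String × String :=
  ((PySem.Str.split₀ r).getD 0 "", (PySem.Str.split₀ r).getD 1 "")

def pvGather (s : List (String × String)) (id : String) : List String :=
  (s.filter (fun p => p.1 == id)).map (fun p => p.2)

lemma pvMem_gather (s : List (String × String)) (id y : String) :
    y ∈ pvGather s id ↔ (id, y) ∈ s := by
  simp [pvGather]

lemma pvCountP_gather (q : String → Bool) (s : List (String × String)) (id : String) :
    (pvGather s id).countP q = s.countP (fun p => p.1 == id && q p.2) := by
  simp [pvGather, List.countP_map, List.countP_filter]
  exact List.countP_congr (fun p _ => by simp [Bool.and_comm])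

lemma pvDictInv (L : List String) (s : PySem.Set (String × String)) (d : PySem.Dict String (PySem.Set String))
    (h : ∀ id : String, PySem.Dict.getD d id PySem.Set.empty = pvGather s id) (id : String) :
    PySem.Dict.getD
      (L.foldl (fun d r => PySem.Dict.modify d (pvTok r).1 PySem.Set.empty
          (fun t => PySem.Set.add t (pvTok r).2)) d) id PySem.Set.empty
    = pvGather (L.foldl (fun s r => PySem.Set.add s (pvTok r)) s) id := by
  induction L generalizing s d with
  | nil => exact h id
  | cons r L ih =>
    simp only [List.foldl_cons]
    apply ih
    intro id'
    rw [PySem.Dict.getD_modify]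
    by_cases hx : pvTok r ∈ s
    · rw [PySem.Set.add_of_mem hx]
      by_cases hid : id' = (pvTok r).1
      · subst hid
        rw [if_pos rfl, h]
        apply PySem.Set.add_of_mem
        rw [pvMem_gather]
        simpa using hx
      · rw [if_neg hid, h]
    · rw [PySem.Set.add_of_not_mem hx]
      by_cases hid : id' = (pvTok r).1
      · subst hid
        rw [if_pos rfl, h]
        rw [PySem.Set.add_of_not_mem]
        · simp [pvGather, List.filter_append]
        · rw [pvMem_gather]
          simpa using hx
      · rw [if_neg hid, h]
        simp only [pvGather, List.filter_append]
        have hb : ((pvTok r).1 == id') = false := by simpa using Ne.symm hid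
        simp [hb]

-- B's dedup loop (seen-set + ordered append) builds exactly the Set.add fold of A
lemma pvPairsInv (L : List String) (l : List (String × String)) (s : PySem.Set (String × String))
    (h : l = s) :
    L.foldl
      (fun (acc : List (String × String) × PySem.Set (String × String)) r =>
        if PySem.Set.contains acc.2 (pvTok r) then acc
        else (acc.1 ++ [pvTok r], PySem.Set.add acc.2 (pvTok r)))
      (l, s)
    = (L.foldl (fun t r => PySem.Set.add t (pvTok r)) s,
       L.foldl (fun t r => PySem.Set.add t (pvTok r)) s) := by
  subst h
  induction L generalizing l with
  | nil => rfl
  | cons r L ih =>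
    simp only [List.foldl_cons]
    by_cases hx : pvTok r ∈ l
    · have hc : PySem.Set.contains l (pvTok r) = true := (PySem.Set.contains_iff _ _).mpr hx
      simp only [hc, if_true, PySem.Set.add_of_mem hx]
      exact ih l
    · have hc : PySem.Set.contains l (pvTok r) = false :=
        Bool.eq_false_iff.mpr (fun hcon => hx ((PySem.Set.contains_iff _ _).mp hcon))
      simp only [hc, Bool.false_eq_true, if_false, PySem.Set.add_of_not_mem hx]
      exact ih (l ++ [pvTok r])

-- membership in A's suspended set, in closed form
lemma pvSusp_mem (S : List (String × String)) (k : Int) (t : String) :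
    PySem.Set.contains
      (PySem.Set.ofList (((PySem.Dict.items (PySem.Dict.counter (S.map (fun p => p.2)))).filter
        (fun kv => k ≤ kv.2)).map (fun kv => kv.1))) t
    = (decide (t ∈ S.map (fun p => p.2)) && decide (k ≤ ((S.map (fun p => p.2)).count t : Int))) := by
  rw [Bool.eq_iff_iff, PySem.Dict.items_counter, List.filter_map, List.map_map]
  simp only [PySem.Set.contains_iff, PySem.Set.mem_ofList, Function.comp, List.mem_map,
    List.mem_filter, Bool.and_eq_true, decide_eq_true_eq]
  constructor
  · rintro ⟨u, ⟨hu, hc⟩, rfl⟩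
    exact ⟨hu, hc⟩
  · rintro ⟨ht, hk⟩
    exact ⟨t, ⟨ht, hk⟩, rfl⟩

-- B's cnt(target) is the multiplicity of target among the deduped pairs' targets
lemma pvCnt_eq (S : List (String × String)) (t : String) :
    pvCnt S t = ((S.map (fun p => p.2)).count t : Int) := by
  unfold pvCnt
  rw [PySem.List.foldl_if_add_one, zero_add]
  simp only [List.count, List.countP_map]
  congr 1

lemma pvMain (id_list report : List String) (k : Int) :
    solution id_list report k = solution_alt id_list report k := by
  simp only [solution, solution_alt]
  rw [PySem.List.foldl_prod_mk
    (f := fun (s : PySem.Set (String × String)) (r : String) =>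
      PySem.Set.add s ((PySem.Str.split₀ r).getD 0 "", (PySem.Str.split₀ r).getD 1 ""))
    (g := fun (d : PySem.Dict String (PySem.Set String)) (r : String) =>
      PySem.Dict.modify d ((PySem.Str.split₀ r).getD 0 "") PySem.Set.empty
        (fun t => PySem.Set.add t ((PySem.Str.split₀ r).getD 1 "")))]
  rw [PySem.List.foldl_append_singleton_eq_map, List.nil_append]
  have hP := pvPairsInv report [] PySem.Set.empty rfl
  simp only [pvTok] at hP
  rw [hP]
  apply List.map_congr_left
  intro id _
  rw [PySem.List.foldl_if_add_one, PySem.List.foldl_if_add_one]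
  have hA := pvDictInv report PySem.Set.empty PySem.Dict.empty
    (by intro i; simp [pvGather, PySem.Dict.getD_empty]) id
  simp only [pvTok] at hA
  rw [hA, pvCountP_gather]
  congr 2
  apply List.countP_congr
  intro p hp
  have hmem : p.2 ∈ (report.foldl (fun (s : PySem.Set (String × String)) r =>
      PySem.Set.add s ((PySem.Str.split₀ r).getD 0 "", (PySem.Str.split₀ r).getD 1 ""))
      PySem.Set.empty).map (fun p => p.2) := List.mem_map_of_mem hp
  dsimp only
  rw [pvSusp_mem, pvCnt_eq, decide_eq_true hmem, Bool.true_and]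

-- ===== VERDICT (by name: the statement is the Claim_ definition above) =====
theorem solution_spec : Claim_equal_solution := by
  intro id_list report k _ _
  unfold Spec_solution
  exact pvMain id_list report k
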